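-- pv_equiv track=rewrite | github.com/D-daze/homework16 | homework16.py | generate_password
-- ===== SOURCE A (Python) =====
-- def generate_password(n):
--     if n < 3 or n > 20:
--         raise ValueError("Число n должно быть в диапазоне от 3 до 20")
--
--     result = []
--     for i in range(1, 21):
--         for j in range(i + 1, 21):
--             pair_sum = i + j
--             if pair_sum % n == 0:
--                 result.append(f"{i}{j}")
--     return ''.join(result)
-- ===== SOURCE B (Python) =====
-- def generate_password(n):
--     if n < 3 or n > 20:
--         raise ValueError("Число n должно быть в диапазоне от 3 до 20")
--
--     parts = []
--     for i in range(1, 21):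
--         # smallest j > i with (i + j) % n == 0, then step by n
--         r = (-i) % n
--         j = i + 1 + (r - (i + 1)) % n
--         while j <= 20:
--             parts.append(f"{i}{j}")
--             j += n
--     return ''.join(parts)
-- ===== Notes on version B (the rewrite author's own statement) =====
-- stated objective: alternative
-- what changed: The inner scan over all j in (i,20] with a modulo test is replaced by direct generation of the qualifying j values: compute the first j > i with (i+j) % n == 0 by residue arithmetic, then step by n.
import Mathlib
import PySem

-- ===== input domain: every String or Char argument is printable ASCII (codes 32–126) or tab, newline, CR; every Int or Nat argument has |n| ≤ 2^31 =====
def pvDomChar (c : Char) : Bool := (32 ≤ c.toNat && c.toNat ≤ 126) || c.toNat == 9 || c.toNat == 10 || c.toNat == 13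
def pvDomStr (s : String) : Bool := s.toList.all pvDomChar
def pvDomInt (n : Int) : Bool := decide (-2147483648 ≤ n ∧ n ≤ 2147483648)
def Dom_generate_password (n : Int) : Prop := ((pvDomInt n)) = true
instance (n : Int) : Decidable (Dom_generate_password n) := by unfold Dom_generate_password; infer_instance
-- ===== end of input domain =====

-- B replaces the modulo-tested inner scan by stepped generation of the matching j values; objective: alternative.

-- ===== PORT A =====
def generate_password (n : Int) : String :=
  if n < 3 ∨ n > 20 then ""  -- A raises ValueError here; excluded by Pre_
  else
    PySem.Str.join ""
      ((PySem.List.pyRange 1 21 1).foldl (fun acc i =>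
        (PySem.List.pyRange (i + 1) 21 1).foldl (fun acc2 j =>
          let pair_sum := i + j
          if PySem.Int.mod pair_sum n = 0 then acc2 ++ [PySem.Int.toStr i ++ PySem.Int.toStr j]
          else acc2) acc) [])

-- ===== PORT B =====
-- the while loop of B: append f"{i}{j}" while j ≤ 20, stepping j by n
-- (the 1 ≤ n guard only ensures totality; B always calls it with n ≥ 3)
-- fuel (21 - j).toNat only bounds the recursion: with n ≥ 1 (always the case in B)
-- it never runs out before the while-condition j ≤ 20 fails
def pvBWhileFuel : Nat → Int → Int → Int → List String
  | 0, _, _, _ => []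
  | fuel + 1, n, i, j =>
    if j ≤ 20 then (PySem.Int.toStr i ++ PySem.Int.toStr j) :: pvBWhileFuel fuel n i (j + n)
    else []

def pvBWhile (n i j : Int) : List String := pvBWhileFuel (21 - j).toNat n i j

def generate_password_alt (n : Int) : String :=
  if n < 3 ∨ n > 20 then ""  -- B raises ValueError here; excluded by Pre_
  else
    PySem.Str.join ""
      ((PySem.List.pyRange 1 21 1).foldl (fun acc i =>
        let r := PySem.Int.mod (-i) n
        let j0 := i + 1 + PySem.Int.mod (r - (i + 1)) n
        acc ++ pvBWhile n i j0) [])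

-- ===== PRECONDITION & SPEC =====
-- A raises ValueError unless 3 ≤ n ≤ 20
def Pre_generate_password (n : Int) : Prop := 3 ≤ n ∧ n ≤ 20
instance (n : Int) : Decidable (Pre_generate_password n) := by unfold Pre_generate_password; infer_instance
def pvWitness_generate_password : Int := (5)

def Spec_generate_password (n : Int) (out : String) : Prop := out = generate_password_alt n
instance (n : Int) (out : String) : Decidable (Spec_generate_password n out) := by unfold Spec_generate_password; infer_instance

-- ===== CLAIM =====
def Claim_equal_generate_password : Prop := ∀ (n : Int), Dom_generate_password n → Pre_generate_password n → Spec_generate_password n (generate_password n)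

-- ===== LEMMAS AND PROOFS =====

-- ===== VERDICT =====
set_option maxRecDepth 4096 in
theorem generate_password_spec : Claim_equal_generate_password := by
  intro n _ hPre
  obtain ⟨h3, h20⟩ := hPre
  unfold Spec_generate_password
  interval_cases n <;> decide
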